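-- pv_equiv track=rewrite | github.com/maxykoin/Slot-Machine | slotmachine.py | winning
-- ===== SOURCE A (Python) =====
-- def winning(columns, lines, bet, values):
--     winnings = 0
--     winlines = []
--     for line in range(lines):
--         symbol = columns[0][line]
--         for column in columns:
--             check = column[line]
--             if symbol != check:
--                 break
--         else:
--             winnings += values[symbol] * bet
--             winlines.append(line + 1)
--
--     return winnings, winlines
-- ===== SOURCE B (Python) =====
-- def winning(columns, lines, bet, values):
--     # column-major: start with every line as a candidate, filter by each remaining column
--     survivors = [(line, columns[0][line]) for line in range(lines)]
--     for column in columns[1:]: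
--         survivors = [(line, symbol) for line, symbol in survivors
--                      if column[line] == symbol]
--     winnings = sum(values[symbol] * bet for _, symbol in survivors)
--     winlines = [line + 1 for line, _ in survivors]
--     return winnings, winlines
-- ===== Notes on version B (the rewrite author's own statement) =====
-- stated objective: alternative
-- what changed: A scans line-by-line with an inner per-column loop and early break; B works column-major: it builds a candidate list of (line, symbol) pairs from column 0, filters it through each remaining column, and pays out the surviving lines.
import Mathlib
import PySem

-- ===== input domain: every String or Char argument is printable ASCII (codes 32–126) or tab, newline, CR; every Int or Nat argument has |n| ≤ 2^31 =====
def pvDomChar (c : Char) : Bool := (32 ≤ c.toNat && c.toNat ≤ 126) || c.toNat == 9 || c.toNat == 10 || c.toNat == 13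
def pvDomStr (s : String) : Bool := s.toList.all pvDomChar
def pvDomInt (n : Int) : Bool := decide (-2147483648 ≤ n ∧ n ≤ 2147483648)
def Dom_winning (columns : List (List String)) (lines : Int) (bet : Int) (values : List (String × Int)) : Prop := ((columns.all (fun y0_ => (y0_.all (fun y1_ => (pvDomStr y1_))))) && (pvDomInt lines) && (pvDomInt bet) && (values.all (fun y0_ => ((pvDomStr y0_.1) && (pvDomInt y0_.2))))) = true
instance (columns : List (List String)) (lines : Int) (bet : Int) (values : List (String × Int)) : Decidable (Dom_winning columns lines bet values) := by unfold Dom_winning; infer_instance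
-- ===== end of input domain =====

-- B replaces A's line-major scan (inner break/else loop per line) by column-major candidate
-- filtering: start from all lines paired with column 0's symbol, filter the candidate list by
-- each remaining column, then pay out the survivors; inputs where A raises are outside Pre_.

-- ===== PORT A =====
-- checkLine is A's inner 'for column in columns: … break' / else loop.
def checkLine : List (List String) → Int → String → Bool
  | [], _, _ => true
  | col :: rest, line, symbol =>
    let check := (PySem.List.pyGet? col line).getD ""
    if symbol ≠ check then false else checkLine rest line symbol

def winning (columns : List (List String)) (lines : Int) (bet : Int) (values : List (String × Int)) : Int × List Int :=
  (PySem.List.pyRange 0 lines 1).foldl (fun (acc : Int × List Int) line =>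
    let symbol := (PySem.List.pyGet? ((PySem.List.pyGet? columns 0).getD []) line).getD ""
    if checkLine columns line symbol then
      (acc.1 + PySem.Dict.getD (PySem.Dict.mk values) symbol 0 * bet, acc.2 ++ [line + 1])
    else acc) (0, [])

-- ===== PORT B =====
def winning_alt (columns : List (List String)) (lines : Int) (bet : Int) (values : List (String × Int)) : Int × List Int :=
  let survivors0 := (PySem.List.pyRange 0 lines 1).map (fun line =>
    (line, (PySem.List.pyGet? ((PySem.List.pyGet? columns 0).getD []) line).getD ""))
  let survivors := (PySem.List.slice columns (some 1) none).foldl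
    (fun (surv : List (Int × String)) column =>
      surv.filter (fun p => (PySem.List.pyGet? column p.1).getD "" == p.2)) survivors0
  let winnings := survivors.foldl (fun (a : Int) p => a + PySem.Dict.getD (PySem.Dict.mk values) p.2 0 * bet) 0
  let winlines := survivors.map (fun p => p.1 + 1)
  (winnings, winlines)

-- ===== PRECONDITION & SPEC =====
-- pvAgreesUpTo columns i k: the first k columns all have line i in range and agree with column 0 there
-- (i.e. A's inner loop at line i reaches column k without breaking).
def pvAgreesUpTo (columns : List (List String)) (i : Nat) (k : Nat) : Bool :=
  (List.range k).all (fun j => decide (i < (columns.getD j []).length) &&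
    ((columns.getD j []).getD i "" == (columns.headD []).getD i ""))

-- Pre_ excludes exactly the inputs on which A raises: an IndexError on columns[0][line] or on a
-- too-short column that the inner loop actually reaches before breaking, or a KeyError on a
-- winning line whose symbol is missing from values.  (B raises on exactly the same inputs.)
def Pre_winning (columns : List (List String)) (lines : Int) (bet : Int) (values : List (String × Int)) : Prop :=
  lines ≤ ((columns.headD []).length : Int) ∧
  ∀ i ∈ List.range lines.toNat,
    (∀ k ∈ List.range columns.length, pvAgreesUpTo columns i k = true → i < (columns.getD k []).length) ∧
    (pvAgreesUpTo columns i columns.length = true → (columns.headD []).getD i "" ∈ values.map Prod.fst)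
instance (columns : List (List String)) (lines : Int) (bet : Int) (values : List (String × Int)) : Decidable (Pre_winning columns lines bet values) := by unfold Pre_winning; infer_instance
def pvWitness_winning : List (List String) × Int × Int × (List (String × Int)) :=
  ([["a", "b"], ["a", "c"]], 2, 5, [("a", 10), ("b", 20), ("c", 30)])

def Spec_winning (columns : List (List String)) (lines : Int) (bet : Int) (values : List (String × Int)) (out : Int × List Int) : Prop := out = winning_alt columns lines bet values
instance (columns : List (List String)) (lines : Int) (bet : Int) (values : List (String × Int)) (out : Int × List Int) : Decidable (Spec_winning columns lines bet values out) := by unfold Spec_winning; infer_instance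

-- ===== CLAIM (what is proved, stated in full; the proofs are below) =====
def Claim_equal_winning : Prop := ∀ (columns : List (List String)) (lines : Int) (bet : Int) (values : List (String × Int)), Dom_winning columns lines bet values → Pre_winning columns lines bet values → Spec_winning columns lines bet values (winning columns lines bet values)

-- ===== LEMMAS AND PROOFS =====

-- A's inner break/else loop succeeds iff every column's symbol on the line equals `s`.
theorem checkLine_eq_all (cs : List (List String)) (line : Int) (s : String) :
    checkLine cs line s = cs.all (fun col => s == (PySem.List.pyGet? col line).getD "") := by
  induction cs with
  | nil => rfl
  | cons c t ih =>
    by_cases h : s = (PySem.List.pyGet? c line).getD ""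
    · subst h; simp [checkLine, ih]
    · simp [checkLine, h]

-- A's all-columns check equals B's tail-columns check (column 0 agrees with its own symbol).
theorem checkLine_eq_tail (columns : List (List String)) (line : Int) :
    checkLine columns line ((PySem.List.pyGet? ((PySem.List.pyGet? columns 0).getD []) line).getD "")
    = columns.tail.all (fun col => (PySem.List.pyGet? col line).getD "" ==
        (PySem.List.pyGet? ((PySem.List.pyGet? columns 0).getD []) line).getD "") := by
  cases columns with
  | nil => rfl
  | cons c t =>
    rw [checkLine_eq_all, Bool.eq_iff_iff]
    simp only [PySem.List.pyGet?_zero_cons, Option.getD_some, List.tail_cons, List.all_cons,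
      List.all_eq_true, beq_iff_eq, Bool.and_eq_true, beq_self_eq_true, true_and]
    exact ⟨fun h x hx => (h x hx).symm, fun h x hx => (h x hx).symm⟩

-- B's column-by-column filtering equals one filter by the conjunction over all columns.
theorem foldl_filter_eq_filter_all {α β : Type} (cols : List β) (f : β → α → Bool) (s : List α) :
    cols.foldl (fun s c => s.filter (f c)) s = s.filter (fun a => cols.all (fun c => f c a)) := by
  induction cols generalizing s with
  | nil => simp
  | cons c t ih =>
    rw [List.foldl_cons, ih, List.filter_filter]
    apply List.filter_congr
    intro a _
    simp [Bool.and_comm]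

-- (l.map f).filter p keeps exactly the images of the kept elements.
theorem filter_map_eq {α β : Type} (f : α → β) (p : β → Bool) (l : List α) :
    (l.map f).filter p = (l.filter (fun a => p (f a))).map f := by
  induction l with
  | nil => rfl
  | cons c t ih =>
    by_cases h : p (f c) <;> simp [h, ih]

theorem foldl_add_shift {α : Type} (L : List α) (w : α → Int) (a : Int) :
    L.foldl (fun x p => x + w p) a = a + L.foldl (fun x p => x + w p) 0 := by
  induction L generalizing a with
  | nil => simp
  | cons c t ih => rw [List.foldl_cons, List.foldl_cons, ih (a + w c), ih (0 + w c)]; ring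

-- A's accumulating loop, split into the filtered payout sum and the filtered line list.
theorem loop_split (L : List Int) (cond : Int → Bool) (w : Int → Int) (a : Int) (b : List Int) :
    L.foldl (fun (acc : Int × List Int) line =>
        if cond line then (acc.1 + w line, acc.2 ++ [line + 1]) else acc) (a, b)
    = (a + (L.filter cond).foldl (fun x line => x + w line) 0,
       b ++ (L.filter cond).map (fun l => l + 1)) := by
  induction L generalizing a b with
  | nil => simp
  | cons c t ih =>
    by_cases h : cond c
    · simp only [List.foldl_cons, List.filter_cons, h, if_pos, ih, List.map_cons,
        List.foldl_cons]
      rw [foldl_add_shift (t.filter cond) w (0 + w c), Prod.mk.injEq]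
      refine ⟨by ring, by simp⟩
    · simp [h, ih]

-- The two ports agree on every input (both totalize out-of-range reads with "").
theorem ports_eq (columns : List (List String)) (lines : Int) (bet : Int) (values : List (String × Int)) :
    winning columns lines bet values = winning_alt columns lines bet values := by
  unfold winning winning_alt
  simp only [PySem.List.slice_from_one]
  rw [foldl_filter_eq_filter_all, filter_map_eq, loop_split (PySem.List.pyRange 0 lines 1)
    (fun line => checkLine columns line ((PySem.List.pyGet? ((PySem.List.pyGet? columns 0).getD []) line).getD ""))
    (fun line => PySem.Dict.getD (PySem.Dict.mk values)
      ((PySem.List.pyGet? ((PySem.List.pyGet? columns 0).getD []) line).getD "") 0 * bet) 0 []]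
  rw [List.foldl_map, List.map_map]
  simp only [Function.comp_def, checkLine_eq_tail, List.nil_append, Int.zero_add]

-- ===== VERDICT (by name: the statement is the Claim_ definition above) =====
theorem winning_spec : Claim_equal_winning := by
  intro columns lines bet values _ _
  exact ports_eq columns lines bet values
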